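-- pv_equiv track=rewrite | github.com/toshikiochiai/NPVAE | model/utils.py | revise_maps
-- ===== SOURCE A (Python) =====
-- import copy
--
-- def revise_maps(labelmap_dict):
--     rev_labelmap_dict = copy.deepcopy(labelmap_dict)
--     max_deg = 0
--     for values in rev_labelmap_dict.values():
--         for v in values:
--             maplist = []
--             for i in list(v.keys()):
--                 maplist += v[i]
--                 if len(v[i]) > max_deg:
--                     max_deg = len(v[i])
--             maplist = sorted(maplist)
--             for i in list(v.keys()):
--                 for j in range(len(v[i])):
--                     v[i][j] = maplist.index(v[i][j]) + 1
--     return rev_labelmap_dict, max_deg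
-- ===== SOURCE B (Python) =====
-- def revise_maps(labelmap_dict):
--     def fix(v):
--         pool = [x for lst in v.values() for x in lst]
--         return {k: [sum(y < x for y in pool) + 1 for x in lst] for k, lst in v.items()}
--     out = {k: [fix(v) for v in values] for k, values in labelmap_dict.items()}
--     max_deg = max((len(lst) for values in labelmap_dict.values()
--                    for v in values for lst in v.values()), default=0)
--     return out, max_deg
-- ===== Notes on version B (the rewrite author's own statement) =====
-- stated objective: simpler
-- what changed: B drops the deepcopy/in-place mutation, the sort and the list.index rank lookup: each entry's rank is the count of strictly smaller pool elements plus one, the result is rebuilt by pure nested comprehensions, and max_deg is computed separately as a single global max over all list lengths instead of being threaded through the mutation loops.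
import Mathlib
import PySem

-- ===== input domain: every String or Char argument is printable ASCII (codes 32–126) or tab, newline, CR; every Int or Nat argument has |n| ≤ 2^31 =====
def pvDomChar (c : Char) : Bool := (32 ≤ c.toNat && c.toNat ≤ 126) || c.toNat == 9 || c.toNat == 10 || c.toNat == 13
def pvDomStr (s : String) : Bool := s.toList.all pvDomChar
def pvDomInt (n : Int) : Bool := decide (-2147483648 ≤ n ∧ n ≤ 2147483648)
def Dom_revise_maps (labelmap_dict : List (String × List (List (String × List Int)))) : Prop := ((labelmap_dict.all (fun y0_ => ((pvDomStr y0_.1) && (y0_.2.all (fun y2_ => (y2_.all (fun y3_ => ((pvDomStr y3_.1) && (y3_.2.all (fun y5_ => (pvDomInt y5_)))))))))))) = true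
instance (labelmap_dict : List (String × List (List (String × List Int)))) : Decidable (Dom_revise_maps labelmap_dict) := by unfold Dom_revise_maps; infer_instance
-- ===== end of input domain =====

-- B replaces A's deepcopy + sort + list.index mutation loops by pure comprehensions
-- (rank = count of strictly smaller pool elements + 1) and computes max_deg in a
-- separate single global max pass instead of threading it through the loops (simpler).
-- Dicts are assoc lists with distinct keys (Python dicts); ports iterate/rebuild them as such.

-- ===== PORT A =====
-- per-submap body of A's two inner key loops: flatten values into maplist while tracking
-- max_deg, sort, then rewrite every entry to maplist.index(entry) + 1.
-- maplist.index never raises here (every entry is in maplist), so `.getD 0` is exact.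
def aSub (md : Int) (v : List (String × List Int)) : (List (String × List Int)) × Int :=
  let st := v.foldl (fun (st : List Int × Int) p =>
      (st.1 ++ p.2, if (p.2.length : Int) > st.2 then (p.2.length : Int) else st.2)) ([], md)
  let s := PySem.List.sorted st.1 (fun y => y) false
  (v.map (fun p => (p.1, p.2.map (fun x => ((PySem.List.index? s x).getD 0 : Int) + 1))), st.2)

def revise_maps (labelmap_dict : List (String × List (List (String × List Int)))) : (List (String × List (List (String × List Int)))) × Int :=
  labelmap_dict.foldl (fun (st : List (String × List (List (String × List Int))) × Int) kv =>
    let inner := kv.2.foldl (fun (st2 : List (List (String × List Int)) × Int) v =>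
        let r := aSub st2.2 v
        (st2.1 ++ [r.1], r.2)) ([], st.2)
    (st.1 ++ [(kv.1, inner.1)], inner.2)) ([], 0)

-- ===== PORT B =====
-- Source B's fix: rank every entry by counting strictly smaller elements of the flattened pool
def bFix (v : List (String × List Int)) : List (String × List Int) :=
  let pool := v.flatMap (fun p => p.2)
  v.map (fun p => (p.1, p.2.map (fun x => (pool.countP (fun y => decide (y < x)) : Int) + 1)))

-- Source B's max_deg generator: all inner list lengths, in order
def bDegs (labelmap_dict : List (String × List (List (String × List Int)))) : List Int :=
  labelmap_dict.flatMap (fun kv => kv.2.flatMap (fun v => v.map (fun p => (p.2.length : Int))))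

def revise_maps_alt (labelmap_dict : List (String × List (List (String × List Int)))) : (List (String × List (List (String × List Int)))) × Int :=
  (labelmap_dict.map (fun kv => (kv.1, kv.2.map bFix)),
   (PySem.List.max? (bDegs labelmap_dict) (fun y => y)).getD 0)

-- ===== PRECONDITION & SPEC =====
def Spec_revise_maps (labelmap_dict : List (String × List (List (String × List Int)))) (out : (List (String × List (List (String × List Int)))) × Int) : Prop := out = revise_maps_alt labelmap_dict
-- instance synthesis needs one manual step: the nesting depth exceeds the default search
def pvDecEqL : DecidableEq (List (String × List (List (String × List Int)))) := fun a b => List.hasDecEq a b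
instance (labelmap_dict : List (String × List (List (String × List Int)))) (out : (List (String × List (List (String × List Int)))) × Int) : Decidable (Spec_revise_maps labelmap_dict out) := by unfold Spec_revise_maps; exact @instDecidableEqProd _ _ pvDecEqL inferInstance out (revise_maps_alt labelmap_dict)

-- ===== CLAIM (what is proved, stated in full; the proofs are below) =====
def Claim_equal_revise_maps : Prop := ∀ (labelmap_dict : List (String × List (List (String × List Int)))), Dom_revise_maps labelmap_dict → Spec_revise_maps labelmap_dict (revise_maps labelmap_dict)

-- ===== LEMMAS AND PROOFS =====

-- A's combined flatten+max fold splits into a flatMap and a running max over lengths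
lemma pairfold_split (v : List (String × List Int)) (a0 : List Int) (m0 : Int) :
    v.foldl (fun (st : List Int × Int) p =>
      (st.1 ++ p.2, if (p.2.length : Int) > st.2 then (p.2.length : Int) else st.2)) (a0, m0)
    = (a0 ++ v.flatMap (fun p => p.2),
       (v.map (fun p => (p.2.length : Int))).foldl max m0) := by
  induction v generalizing a0 m0 with
  | nil => simp
  | cons p t ih =>
    simp only [List.foldl_cons, ih, List.flatMap_cons, List.append_assoc, List.map_cons]
    rw [show (if ((p.2.length : Int)) > m0 then ((p.2.length : Int)) else m0) = max m0 (p.2.length : Int) by omega]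

-- in a ≤-sorted list, the first index of a member x is the count of elements < x
lemma index?_of_pairwise (s : List Int) (x : Int) (hs : s.Pairwise (· ≤ ·)) (hx : x ∈ s) :
    PySem.List.index? s x = some (s.countP (fun y => decide (y < x))) := by
  induction s with
  | nil => cases hx
  | cons a t ih =>
    rcases List.pairwise_cons.mp hs with ⟨ha, ht⟩
    by_cases hax : a = x
    · subst hax
      have h0 : t.countP (fun y => decide (y < a)) = 0 :=
        List.countP_eq_zero.mpr (fun y hy => by simpa using not_lt.mpr (ha y hy))
      rw [PySem.List.index?_cons_self]
      simp [h0]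
    · have hxt : x ∈ t := by
        cases hx with
        | head => exact absurd rfl hax
        | tail _ h => exact h
      have hax' : a < x := lt_of_le_of_ne (ha x hxt) hax
      rw [PySem.List.index?_cons_of_ne t hax, ih ht hxt]
      simp [hax', Nat.add_comm]

-- the rank A computes via sort+index equals B's count of smaller pool elements
lemma rank_eq (pool : List Int) (x : Int) (hx : x ∈ pool) :
    ((PySem.List.index? (PySem.List.sorted pool (fun y => y) false) x).getD 0 : Int) + 1
      = (pool.countP (fun y => decide (y < x)) : Int) + 1 := by
  have hsx : x ∈ PySem.List.sorted pool (fun y => y) false :=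
    (PySem.List.mem_sorted pool (fun y => y) false x).mpr hx
  have hp : (PySem.List.sorted pool (fun y => y) false).Pairwise (· ≤ ·) :=
    PySem.List.sorted_pairwise pool (fun y => y)
  rw [index?_of_pairwise _ x hp hsx]
  have hcp : (PySem.List.sorted pool (fun y => y) false).countP (fun y => decide (y < x))
      = pool.countP (fun y => decide (y < x)) :=
    (PySem.List.sorted_perm pool (fun y => y) false).countP_eq _
  simp [hcp]

-- A's per-submap step produces B's fix, plus the running max of the submap's lengths
lemma aSub_eq (md : Int) (v : List (String × List Int)) :
    aSub md v = (bFix v, (v.map (fun p => (p.2.length : Int))).foldl max md) := by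
  unfold aSub bFix
  rw [pairfold_split]
  refine Prod.ext ?_ rfl
  simp only []
  refine List.map_congr_left (fun p hp => ?_)
  refine Prod.ext rfl ?_
  refine List.map_congr_left (fun x hx => ?_)
  simpa using rank_eq _ x (List.mem_flatMap.mpr ⟨p, hp, hx⟩)

-- A's inner fold over one key's value list = mapped bFix output + running max over its lengths
lemma inner_eq (vs : List (List (String × List Int))) (acc : List (List (String × List Int))) (md : Int) :
    vs.foldl (fun (st2 : List (List (String × List Int)) × Int) v =>
        let r := aSub st2.2 v
        (st2.1 ++ [r.1], r.2)) (acc, md)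
    = (acc ++ vs.map bFix,
       (vs.flatMap (fun v => v.map (fun p => (p.2.length : Int)))).foldl max md) := by
  induction vs generalizing acc md with
  | nil => simp
  | cons v t ih =>
    have h1 := aSub_eq md v
    simp only [List.foldl_cons, h1]
    rw [ih]
    simp [List.flatMap_cons, List.foldl_append, List.append_assoc]

-- A's outer fold = mapped output + running max over all lengths
lemma outer_eq (d : List (String × List (List (String × List Int))))
    (acc : List (String × List (List (String × List Int)))) (md : Int) :
    d.foldl (fun (st : List (String × List (List (String × List Int))) × Int) kv =>
      let inner := kv.2.foldl (fun (st2 : List (List (String × List Int)) × Int) v =>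
          let r := aSub st2.2 v
          (st2.1 ++ [r.1], r.2)) ([], st.2)
      (st.1 ++ [(kv.1, inner.1)], inner.2)) (acc, md)
    = (acc ++ d.map (fun kv => (kv.1, kv.2.map bFix)), (bDegs d).foldl max md) := by
  induction d generalizing acc md with
  | nil => simp [bDegs]
  | cons kv t ih =>
    have h1 := inner_eq kv.2 [] md
    simp only [List.foldl_cons, h1, List.nil_append]
    rw [ih]
    simp [bDegs, List.flatMap_cons, List.foldl_append, List.append_assoc]

-- the running max from 0 over a nonnegative list is Python's max(..., default=0)
lemma foldl_max_eq_max? (l : List Int) (h : ∀ x ∈ l, 0 ≤ x) :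
    l.foldl max 0 = (PySem.List.max? l (fun y => y)).getD 0 := by
  cases l with
  | nil => simp [PySem.List.max?]
  | cons a t =>
    rw [PySem.List.max?_id_cons]
    have ha : max 0 a = a := max_eq_right (h a (List.mem_cons_self))
    simp [List.foldl_cons, ha]

lemma bDegs_nonneg (d : List (String × List (List (String × List Int)))) :
    ∀ x ∈ bDegs d, 0 ≤ x := by
  intro x hx
  simp only [bDegs, List.mem_flatMap, List.mem_map] at hx
  obtain ⟨kv, _, v, _, p, _, he⟩ := hx
  omega

-- ===== VERDICT (by name: the statement is the Claim_ definition above) =====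
theorem revise_maps_spec : Claim_equal_revise_maps := by
  intro d _
  unfold Spec_revise_maps revise_maps revise_maps_alt
  rw [outer_eq, List.nil_append, foldl_max_eq_max? _ (bDegs_nonneg d)]
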